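-- pv_equiv track=rewrite | github.com/ericmerle3789/Collatz-Junction-Theorem | syracuse_jepa/pipeline/effective_budget.py | partitions_at_most_k
-- ===== SOURCE A (Python) =====
-- def partitions_at_most_k(n: int, k: int) -> int:
--     """Count partitions of n into at most k parts."""
--     dp = [[0] * (k + 1) for _ in range(n + 1)]
--     for j in range(k + 1):
--         dp[0][j] = 1
--     for i in range(1, n + 1):
--         for j in range(1, k + 1):
--             dp[i][j] = dp[i][j - 1]
--             if i >= j:
--                 dp[i][j] += dp[i - j][j]
--     return dp[n][k]
-- ===== SOURCE B (Python) =====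
-- def partitions_at_most_k(n: int, k: int) -> int:
--     """Count partitions of n into at most k parts, as the SUM over j = 0..k of
--     the number of partitions of n into EXACTLY j parts.  The exactly-j counts
--     obey e(m, j) = e(m-1, j-1) + e(m-j, j) (split partitions by whether the
--     smallest part is 1: drop a part of size 1, or subtract 1 from every part),
--     computed one column (one j) at a time from the previous column."""
--     prev = [1] + [0] * n          # e(., 0): only the empty partition of 0
--     total = prev[n]               # j = 0 term
--     for j in range(1, k + 1):
--         cur = [0] * (n + 1)       # e(., j); stays 0 for m < j
--         for m in range(j, n + 1):
--             cur[m] = prev[m - 1] + cur[m - j]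
--         total += cur[n]
--         prev = cur
--     return total
-- ===== Notes on version B (the rewrite author's own statement) =====
-- stated objective: alternative
-- what changed: Instead of A's (n+1)x(k+1) at-most-j table with recurrence dp[i][j]=dp[i][j-1]+dp[i-j][j] read off at one cell, B counts partitions into EXACTLY j parts via the different recurrence e(m,j)=e(m-1,j-1)+e(m-j,j) (drop a part equal to 1 vs subtract 1 from every part), building one 1D column per j and returning the running sum of e(n,j) over j=0..k (O(n) working memory instead of O(n*k)).
import Mathlib
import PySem

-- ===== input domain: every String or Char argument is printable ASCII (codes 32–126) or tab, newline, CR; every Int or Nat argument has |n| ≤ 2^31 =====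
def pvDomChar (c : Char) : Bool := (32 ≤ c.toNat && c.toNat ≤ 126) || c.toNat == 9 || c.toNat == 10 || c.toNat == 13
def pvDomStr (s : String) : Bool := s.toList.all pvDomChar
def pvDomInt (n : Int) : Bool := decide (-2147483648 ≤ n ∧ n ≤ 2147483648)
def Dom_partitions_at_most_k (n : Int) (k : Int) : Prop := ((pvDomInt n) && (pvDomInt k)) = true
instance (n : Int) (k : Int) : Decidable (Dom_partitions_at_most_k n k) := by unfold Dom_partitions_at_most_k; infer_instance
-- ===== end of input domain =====

-- B counts partitions of n into EXACTLY j parts for each j (recurrence e(m,j) = e(m-1,j-1) + e(m-j,j),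
-- a different recurrence than A's at-most-j table dp[i][j] = dp[i][j-1] + dp[i-j][j]) and returns the
-- running sum of e(n,j) over j = 0..k; equivalence is proved on n ≥ 0 ∧ k ≥ 0, elsewhere Python A raises.
-- Both ports use Array for Python's lists; fuel only makes each loop's recursion structural,
-- the loop condition is the same test the Python loop performs.

-- ===== PORT A =====
-- inner loop: for j in range(1, k+1): dp[i][j] = dp[i][j-1] (+ dp[i-j][j] if i ≥ j)
-- `row` is dp[i] while it is being filled; `prev` holds the other rows (only rows < i are read)
def pvLoopJ (fuel : Nat) (prev : Array (Array Int)) (row : Array Int) (i : Nat) (j : Nat) (k : Nat) : Array Int :=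
  match fuel with
  | 0 => row
  | f + 1 =>
    if j ≤ k then
      let v := row.getD (j - 1) 0 + (if j ≤ i then (prev.getD (i - j) #[]).getD j 0 else 0)
      pvLoopJ f prev (row.setIfInBounds j v) i (j + 1) k
    else row

-- outer loop: for i in range(1, n+1)
def pvLoopI (fuel : Nat) (dp : Array (Array Int)) (i : Nat) (n : Nat) (k : Nat) : Array (Array Int) :=
  match fuel with
  | 0 => dp
  | f + 1 =>
    if i ≤ n then
      pvLoopI f (dp.setIfInBounds i (pvLoopJ (k + 1) dp (dp.getD i #[]) i 1 k)) (i + 1) n k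
    else dp

def partitions_at_most_k (n : Int) (k : Int) : Int :=
  let nn := n.toNat
  let kk := k.toNat
  -- dp = [[0]*(k+1) for _ in range(n+1)]; for j in range(k+1): dp[0][j] = 1
  let dp0 : Array (Array Int) :=
    (Array.replicate (nn + 1) (Array.replicate (kk + 1) (0 : Int))).setIfInBounds 0
      (Array.replicate (kk + 1) (1 : Int))
  let dp := pvLoopI (nn + 1) dp0 1 nn kk
  (dp.getD nn #[]).getD kk 0

-- ===== PORT B =====
-- inner loop: for m in range(j, n+1): cur[m] = prev[m-1] + cur[m-j]
def pvColM (fuel : Nat) (prev : Array Int) (cur : Array Int) (j : Nat) (m : Nat) (n : Nat) : Array Int :=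
  match fuel with
  | 0 => cur
  | f + 1 =>
    if m ≤ n then
      pvColM f prev (cur.setIfInBounds m (prev.getD (m - 1) 0 + cur.getD (m - j) 0)) j (m + 1) n
    else cur

-- outer loop: for j in range(1, k+1): cur = …; total += cur[n]; prev = cur
def pvColJ (fuel : Nat) (prev : Array Int) (total : Int) (j : Nat) (k : Nat) (n : Nat) : Int :=
  match fuel with
  | 0 => total
  | f + 1 =>
    if j ≤ k then
      let cur := pvColM (n + 1) prev (Array.replicate (n + 1) (0 : Int)) j j n
      pvColJ f cur (total + cur.getD n 0) (j + 1) k n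
    else total

def partitions_at_most_k_alt (n : Int) (k : Int) : Int :=
  let nn := n.toNat
  let kk := k.toNat
  -- prev = [1] + [0]*n; total = prev[n]
  let prev : Array Int := #[(1 : Int)] ++ Array.replicate nn (0 : Int)
  pvColJ (kk + 1) prev (prev.getD nn 0) 1 kk nn

-- ===== PRECONDITION & SPEC =====
-- Python A raises IndexError whenever n < 0 or k < 0 (empty table / empty rows); nothing else is excluded.
def Pre_partitions_at_most_k (n : Int) (k : Int) : Prop := 0 ≤ n ∧ 0 ≤ k
instance (n : Int) (k : Int) : Decidable (Pre_partitions_at_most_k n k) := by unfold Pre_partitions_at_most_k; infer_instance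
def pvWitness_partitions_at_most_k : Int × Int := (4, 3)

def Spec_partitions_at_most_k (n : Int) (k : Int) (out : Int) : Prop := out = partitions_at_most_k_alt n k
instance (n : Int) (k : Int) (out : Int) : Decidable (Spec_partitions_at_most_k n k out) := by unfold Spec_partitions_at_most_k; infer_instance

-- ===== CLAIM (what is proved, stated in full; the proofs are below) =====
def Claim_equal_partitions_at_most_k : Prop := ∀ (n : Int) (k : Int), Dom_partitions_at_most_k n k → Pre_partitions_at_most_k n k → Spec_partitions_at_most_k n k (partitions_at_most_k n k)

-- ===== LEMMAS AND PROOFS =====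

-- reference for A: the at-most-k recurrence p(n,k) = p(n,k-1) + p(n-k,k)
def pRef (n k : Nat) : Int :=
  if n = 0 then 1
  else if k = 0 then 0
  else pRef n (k - 1) + (if k ≤ n then pRef (n - k) k else 0)
termination_by (n, k)
decreasing_by
  · apply Prod.Lex.right; omega
  · apply Prod.Lex.left; omega

theorem pRef_n_zero (k : Nat) : pRef 0 k = 1 := by rw [pRef]; simp
theorem pRef_k_zero (n : Nat) (h : n ≠ 0) : pRef n 0 = 0 := by rw [pRef]; simp [h]
theorem pRef_step (n k : Nat) (hn : n ≠ 0) (hk : k ≠ 0) :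
    pRef n k = pRef n (k - 1) + (if k ≤ n then pRef (n - k) k else 0) := by
  rw [pRef]; simp [hn, hk]

-- reference for B: partitions of m into exactly j parts
def eRef (m j : Nat) : Int :=
  if m = 0 then (if j = 0 then 1 else 0)
  else if j = 0 then 0
  else eRef (m - 1) (j - 1) + (if j ≤ m then eRef (m - j) j else 0)
termination_by (m, j)
decreasing_by
  · apply Prod.Lex.left; omega
  · apply Prod.Lex.left; omega

theorem eRef_zero (j : Nat) : eRef 0 j = if j = 0 then 1 else 0 := by rw [eRef]; simp
theorem eRef_j_zero (m : Nat) : eRef m 0 = if m = 0 then 1 else 0 := by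
  rw [eRef]; by_cases hm : m = 0 <;> simp [hm]
theorem eRef_step (m j : Nat) (hm : m ≠ 0) (hj : j ≠ 0) :
    eRef m j = eRef (m - 1) (j - 1) + (if j ≤ m then eRef (m - j) j else 0) := by
  rw [eRef]; simp [hm, hj]

theorem eRef_lt (m : Nat) : ∀ j, m < j → eRef m j = 0 := by
  induction m using Nat.strong_induction_on with
  | _ m ih =>
    intro j hj
    rcases Nat.eq_zero_or_pos m with hm | hm
    · subst hm; rw [eRef_zero, if_neg (by omega)]
    · rw [eRef_step m j (by omega) (by omega), if_neg (by omega),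
        ih (m - 1) (by omega) (j - 1) (by omega)]
      ring

-- e(m,j) = p(m-j, ≤j): subtracting 1 from each of the exactly j parts leaves at most j parts of m-j
theorem eRef_eq_pRef (m : Nat) : ∀ j, 1 ≤ j → eRef m j = if j ≤ m then pRef (m - j) j else 0 := by
  induction m using Nat.strong_induction_on with
  | _ m ih =>
    intro j hj
    by_cases hjm : j ≤ m
    · rw [if_pos hjm]
      have hm : m ≠ 0 := by omega
      rw [eRef_step m j hm (by omega), if_pos hjm]
      have h1 : eRef (m - 1) (j - 1) = pRef (m - j) (j - 1) := by
        by_cases hj1 : j = 1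
        · subst hj1
          rw [eRef_j_zero]
          simp only [Nat.sub_self] at *
          by_cases hm1 : m - 1 = 0
          · rw [if_pos hm1, hm1, pRef_n_zero]
          · rw [if_neg hm1, pRef_k_zero _ hm1]
        · have := ih (m - 1) (by omega) (j - 1) (by omega)
          rw [this, if_pos (by omega)]
          congr 1
          omega
      have h2 : eRef (m - j) j = if j ≤ m - j then pRef (m - j - j) j else 0 := by
        rcases Nat.eq_zero_or_pos (m - j) with h0 | h0
        · rw [h0, eRef_zero, if_neg (by omega), if_neg (by omega)]
        · exact ih (m - j) (by omega) j hj
      rw [h1, h2]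
      rcases Nat.eq_zero_or_pos (m - j) with h0 | h0
      · rw [h0, if_neg (by omega)]
        simp [pRef_n_zero]
      · rw [(pRef_step (m - j) j (by omega) (by omega)).symm]
    · rw [if_neg hjm]
      exact eRef_lt m j (by omega)

-- running sum of the exactly-j counts
def sSum (n : Nat) : Nat → Int
  | 0 => eRef n 0
  | j + 1 => sSum n j + eRef n (j + 1)

theorem sSum_succ (n j : Nat) (hj : 1 ≤ j) : sSum n j = sSum n (j - 1) + eRef n j := by
  cases j with
  | zero => omega
  | succ j' => simp [sSum]

theorem pRef_eq_sSum (n k : Nat) : pRef n k = sSum n k := by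
  induction k with
  | zero =>
    rw [sSum, eRef_j_zero]
    by_cases hn : n = 0
    · rw [hn, pRef_n_zero, if_pos rfl]
    · rw [pRef_k_zero n hn, if_neg hn]
  | succ k ih =>
    rcases Nat.eq_zero_or_pos n with hn | hn
    · subst hn
      rw [pRef_n_zero, sSum, ← ih, pRef_n_zero, eRef_zero, if_neg (by omega)]
      ring
    · rw [sSum, ← ih, pRef_step n (k + 1) (by omega) (by omega)]
      simp only [Nat.add_sub_cancel]
      congr 1
      rw [eRef_eq_pRef n (k + 1) (by omega)]

theorem getD_set_self (a : Array Int) (i : Nat) (v : Int) (h : i < a.size) :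
    (a.setIfInBounds i v).getD i 0 = v := by
  simp [Array.getD_eq_getD_getElem?, h]

theorem getD_set_ne (a : Array Int) (i j : Nat) (v : Int) (h : i ≠ j) :
    (a.setIfInBounds i v).getD j 0 = a.getD j 0 := by
  simp [Array.getD_eq_getD_getElem?, h]

theorem getDL_set_self (a : Array (Array Int)) (i : Nat) (v : Array Int) (h : i < a.size) :
    (a.setIfInBounds i v).getD i #[] = v := by
  simp [Array.getD_eq_getD_getElem?, h]

theorem getDL_set_ne (a : Array (Array Int)) (i j : Nat) (v : Array Int) (h : i ≠ j) :
    (a.setIfInBounds i v).getD j #[] = a.getD j #[] := by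
  simp [Array.getD_eq_getD_getElem?, h]

theorem getD_replicate (m : Nat) (j : Nat) (v : Int) (h : j < m) :
    (Array.replicate m v).getD j 0 = v := by
  simp [Array.getD_eq_getD_getElem?, h]

theorem getDL_replicate (m : Nat) (j : Nat) (v : Array Int) (h : j < m) :
    (Array.replicate m v).getD j #[] = v := by
  simp [Array.getD_eq_getD_getElem?, h]

-- ===== B-side correctness =====

theorem colM_size (n j : Nat) (prev : Array Int) :
    ∀ fuel m cur, (cur : Array Int).size = n + 1 → (pvColM fuel prev cur j m n).size = n + 1 := by
  intro fuel
  induction fuel with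
  | zero => intro m cur hc; exact hc
  | succ f ih =>
    intro m cur hc
    by_cases hmn : m ≤ n
    · rw [pvColM, if_pos hmn]; exact ih (m + 1) _ (by simp [hc])
    · rw [pvColM, if_neg hmn]; exact hc

-- invariant through pvColM at column j: cells below m hold eRef · j, prev holds column j-1
theorem colM_inv (n j : Nat) (hj : 1 ≤ j) (prev : Array Int)
    (hprev : ∀ t, t ≤ n → prev.getD t 0 = eRef t (j - 1)) :
    ∀ fuel m cur, n + 1 - m ≤ fuel → j ≤ m → (cur : Array Int).size = n + 1 →
    (∀ t, t < m → t ≤ n → cur.getD t 0 = eRef t j) →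
    ∀ t, t ≤ n → (pvColM fuel prev cur j m n).getD t 0 = eRef t j := by
  intro fuel
  induction fuel with
  | zero =>
    intro m cur hm hjm hlen hlo t ht
    exact hlo t (by omega) ht
  | succ f ih =>
    intro m cur hm hjm hlen hlo t ht
    by_cases hmn : m ≤ n
    · rw [pvColM, if_pos hmn]
      refine ih (m + 1) _ (by omega) (by omega) (by simp [hlen]) ?_ t ht
      intro u hu hun
      by_cases hum : u = m
      · rw [hum, getD_set_self _ _ _ (by omega)]
        rw [hprev (m - 1) (by omega), hlo (m - j) (by omega) (by omega)]
        rw [eRef_step m j (by omega) (by omega), if_pos hjm]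
      · rw [getD_set_ne _ _ _ _ (by omega)]
        exact hlo u (by omega) hun
    · rw [pvColM, if_neg hmn]
      exact hlo t (by omega) ht

-- invariant through pvColJ: entering pass j, prev holds column j-1 and total = sSum n (j-1)
theorem colJ_inv (n k : Nat) :
    ∀ fuel j prev total, k + 1 - j ≤ fuel → 1 ≤ j → j ≤ k + 1 → (prev : Array Int).size = n + 1 →
    (∀ t, t ≤ n → prev.getD t 0 = eRef t (j - 1)) → total = sSum n (j - 1) →
    pvColJ fuel prev total j k n = sSum n k := by
  intro fuel
  induction fuel with
  | zero =>
    intro j prev total hm hj hjk hlen hprev htot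
    have : j = k + 1 := by omega
    rw [pvColJ, htot, this]
    simp
  | succ f ih =>
    intro j prev total hm hj hjk hlen hprev htot
    by_cases hjle : j ≤ k
    · rw [pvColJ, if_pos hjle]
      have hcsize : (pvColM (n + 1) prev (Array.replicate (n + 1) (0 : Int)) j j n).size = n + 1 :=
        colM_size n j prev (n + 1) j _ (by simp)
      have hcur : ∀ t, t ≤ n →
          (pvColM (n + 1) prev (Array.replicate (n + 1) (0 : Int)) j j n).getD t 0 = eRef t j := by
        refine colM_inv n j hj prev hprev (n + 1) j _ (by omega) (le_refl j) (by simp) ?_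
        intro u hu hun
        rw [getD_replicate _ _ _ (by omega), eRef_lt u j (by omega)]
      refine ih (j + 1) _ _ (by omega) (by omega) (by omega) hcsize
        (by intro t ht; simpa using hcur t ht) ?_
      rw [htot, hcur n (le_refl n), Nat.add_sub_cancel]
      exact (sSum_succ n j hj).symm
    · rw [pvColJ, if_neg hjle]
      have : j = k + 1 := by omega
      rw [htot, this]
      simp

theorem portB_eq_pRef (nn kk : Nat) :
    partitions_at_most_k_alt (nn : Int) (kk : Int) = pRef nn kk := by
  show pvColJ (((kk : Int)).toNat + 1)
      (#[(1 : Int)] ++ Array.replicate ((nn : Int)).toNat (0 : Int))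
      ((#[(1 : Int)] ++ Array.replicate ((nn : Int)).toNat (0 : Int)).getD ((nn : Int)).toNat 0)
      1 ((kk : Int)).toNat ((nn : Int)).toNat = pRef nn kk
  rw [Int.toNat_natCast, Int.toNat_natCast]
  have hgd : ∀ t, t ≤ nn →
      (#[(1 : Int)] ++ Array.replicate nn (0 : Int)).getD t 0 = eRef t 0 := by
    intro t ht
    rw [eRef_j_zero]
    cases t with
    | zero =>
      simp [Array.getD_eq_getD_getElem?]
    | succ u =>
      rw [if_neg (by omega)]
      have h1 : ((#[(1 : Int)] ++ Array.replicate nn (0 : Int)))[u + 1]? =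
          (Array.replicate nn (0 : Int))[u]? := by
        rw [Array.getElem?_append_right (by simp)]
        simp
      rw [Array.getD_eq_getD_getElem?, h1]
      simp [show u < nn by omega]
  rw [pRef_eq_sSum]
  refine colJ_inv nn kk (kk + 1) 1 _ _ (by omega) (le_refl 1) (by omega) (by simp; omega) ?_ ?_
  · intro t ht; simpa using hgd t ht
  · rw [sSum]
    simpa using hgd nn (le_refl nn)

-- ===== A-side correctness =====

-- through pvLoopJ at row i: rows < i of prev correct, row filled below j ⇒ row fully correct
theorem loopJ_inv (k i : Nat) (hi : 1 ≤ i) (prev : Array (Array Int))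
    (hprev : ∀ i', i' < i → ∀ j', j' ≤ k → (prev.getD i' #[]).getD j' 0 = pRef i' j') :
    ∀ fuel j row, k + 1 - j ≤ fuel → 1 ≤ j → (row : Array Int).size = k + 1 →
    (∀ j', j' < j → row.getD j' 0 = pRef i j') →
    ∀ j', j' ≤ k → (pvLoopJ fuel prev row i j k).getD j' 0 = pRef i j' := by
  intro fuel
  induction fuel with
  | zero =>
    intro j row hm hj hrlen hrow j' hj'
    exact hrow j' (by omega)
  | succ f ih =>
    intro j row hm hj hrlen hrow j' hj'
    by_cases hjk : j ≤ k
    · rw [pvLoopJ]; rw [if_pos hjk]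
      have hj0 : j ≠ 0 := by omega
      set v := row.getD (j - 1) 0 + (if j ≤ i then (prev.getD (i - j) #[]).getD j 0 else 0) with hv
      have hvval : v = pRef i j := by
        have h1 : row.getD (j - 1) 0 = pRef i (j - 1) := hrow (j - 1) (by omega)
        rw [pRef_step i j (by omega) hj0, ← h1, hv]
        congr 1
        by_cases hji : j ≤ i
        · rw [if_pos hji, if_pos hji]
          exact hprev (i - j) (by omega) j (by omega)
        · rw [if_neg hji, if_neg hji]
      refine ih (j + 1) (row.setIfInBounds j v) (by omega) (by omega) (by simp [hrlen]) ?_ j' hj'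
      intro j'' hj''
      by_cases hjj : j'' = j
      · rw [hjj, getD_set_self _ _ _ (by omega), hvval]
      · rw [getD_set_ne _ _ _ _ (fun h => hjj h.symm)]
        exact hrow j'' (by omega)
    · rw [pvLoopJ]; rw [if_neg hjk]
      exact hrow j' (by omega)

-- pvLoopI fills rows 1..n; entering with counter i: rows < i correct, rows ≥ i still the zero row
theorem loopI_inv (n k : Nat) :
    ∀ fuel i dp, n + 1 - i ≤ fuel → 1 ≤ i → dp.size = n + 1 →
    (∀ i', i' < i → i' ≤ n → ∀ j', j' ≤ k → (dp.getD i' #[]).getD j' 0 = pRef i' j') →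
    (∀ i', i ≤ i' → i' ≤ n → dp.getD i' #[] = Array.replicate (k + 1) (0 : Int)) →
    ∀ i', i' ≤ n → ∀ j', j' ≤ k → ((pvLoopI fuel dp i n k).getD i' #[]).getD j' 0 = pRef i' j' := by
  intro fuel
  induction fuel with
  | zero =>
    intro i dp hm hi hlen hprev hzero i' hi' j' hj'
    exact hprev i' (by omega) hi' j' hj'
  | succ f ih =>
    intro i dp hm hi hlen hprev hzero i' hi' j' hj'
    by_cases hin : i ≤ n
    · rw [pvLoopI, if_pos hin]
      have hrowi : dp.getD i #[] = Array.replicate (k + 1) (0 : Int) := hzero i (le_refl i) hin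
      have hJ : ∀ j'', j'' ≤ k →
          (pvLoopJ (k + 1) dp (dp.getD i #[]) i 1 k).getD j'' 0 = pRef i j'' := by
        refine loopJ_inv k i hi dp (fun a ha b hb => hprev a ha (by omega) b hb)
          (k + 1) 1 _ (by omega) (le_refl 1) (by rw [hrowi]; simp) ?_
        intro j'' hj''
        have hj0 : j'' = 0 := by omega
        subst hj0
        rw [hrowi, getD_replicate _ _ _ (by omega), pRef_k_zero i (by omega)]
      refine ih (i + 1) _ (by omega) (by omega) (by simp [hlen]) ?_ ?_ i' hi' j' hj'
      · intro a ha hale b hb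
        by_cases hai : a = i
        · rw [hai, getDL_set_self _ _ _ (by omega)]
          exact hJ b hb
        · rw [getDL_set_ne _ _ _ _ (fun h => hai h.symm)]
          exact hprev a (by omega) hale b hb
      · intro a ha hale
        rw [getDL_set_ne _ _ _ _ (by omega)]
        exact hzero a (by omega) hale
    · rw [pvLoopI, if_neg hin]
      exact hprev i' (by omega) hi' j' hj'

theorem portA_eq_pRef (nn kk : Nat) :
    partitions_at_most_k (nn : Int) (kk : Int) = pRef nn kk := by
  show ((pvLoopI (((nn : Int)).toNat + 1)
      ((Array.replicate (((nn : Int)).toNat + 1) (Array.replicate (((kk : Int)).toNat + 1) (0 : Int))).setIfInBounds 0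
        (Array.replicate (((kk : Int)).toNat + 1) (1 : Int)))
      1 ((nn : Int)).toNat ((kk : Int)).toNat).getD ((nn : Int)).toNat #[]).getD ((kk : Int)).toNat 0 = pRef nn kk
  rw [Int.toNat_natCast, Int.toNat_natCast]
  refine loopI_inv nn kk (nn + 1) 1 _ (by omega) (le_refl 1) (by simp) ?_ ?_ nn (le_refl nn) kk (le_refl kk)
  · intro a ha _ b hb
    have : a = 0 := by omega
    subst this
    rw [getDL_set_self _ _ _ (by simp), getD_replicate _ _ _ (by omega), pRef_n_zero]
  · intro a ha hale
    rw [getDL_set_ne _ _ _ _ (by omega), getDL_replicate _ _ _ (by omega)]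

-- ===== VERDICT (by name: the statement is the Claim_ definition above) =====
theorem partitions_at_most_k_spec : Claim_equal_partitions_at_most_k := by
  intro n k _ hpre
  obtain ⟨hn, hk⟩ := hpre
  unfold Spec_partitions_at_most_k
  obtain ⟨nn, rfl⟩ := Int.eq_ofNat_of_zero_le hn
  obtain ⟨kk, rfl⟩ := Int.eq_ofNat_of_zero_le hk
  rw [portA_eq_pRef, portB_eq_pRef]
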